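-- pv_equiv track=rewrite | github.com/hustlevoid/AI_Based_Movie_Recomendation_System | AI_Based_Movie_Recomendation_System.py | keywordl
-- ===== SOURCE A (Python) =====
-- def keywordl(text):
--     fword, cword = [], ""
--     for letter in text.lower():
--         if letter.isalnum():
--             cword += letter
--         else:
--             if len(cword) > 3:
--                 fword.append(cword)
--             cword = ""
--     if len(cword) > 3:
--         fword.append(cword)
--     return fword
-- ===== SOURCE B (Python) =====
-- def keywordl(text):
--     s = text.lower()
--     fword = []
--     i, n = 0, len(s)
--     while i < n:
--         if s[i].isalnum():
--             j = i
--             while j < n and s[j].isalnum():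
--                 j += 1
--             if j - i > 3:
--                 fword.append(s[i:j])
--             i = j
--         else:
--             i += 1
--     return fword
-- ===== Notes on version B (the rewrite author's own statement) =====
-- stated objective: alternative
-- what changed: Replaces A's per-character accumulator/flush state machine (with a separate post-loop trailing flush) by a two-pointer run scan: find each maximal alphanumeric run, slice it out, and keep it if longer than 3.
import Mathlib
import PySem

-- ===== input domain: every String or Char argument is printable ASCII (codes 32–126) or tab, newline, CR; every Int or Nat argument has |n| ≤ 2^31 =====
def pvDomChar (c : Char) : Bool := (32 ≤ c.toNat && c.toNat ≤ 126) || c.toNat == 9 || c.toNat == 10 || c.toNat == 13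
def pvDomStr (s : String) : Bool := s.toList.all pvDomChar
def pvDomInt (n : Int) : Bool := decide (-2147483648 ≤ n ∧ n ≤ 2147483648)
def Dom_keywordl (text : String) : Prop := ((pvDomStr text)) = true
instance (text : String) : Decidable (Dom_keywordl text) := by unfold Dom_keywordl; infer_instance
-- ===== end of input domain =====

-- B replaces A's per-character accumulator/flush state machine by a two-pointer maximal-run scan (alternative, same cost).

-- ===== PORT A =====
-- A's for-loop over text.lower(); the string accumulator cword is ported as its list of characters (exact).
def keywordlLoopA : List Char → List String → List Char → List String
  | [], fword, cword => if 3 < cword.length then fword ++ [String.mk cword] else fword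
  | c :: cs, fword, cword =>
    if PySem.Chars.isalnum c then keywordlLoopA cs fword (cword ++ [c])
    else if 3 < cword.length then keywordlLoopA cs (fword ++ [String.mk cword]) []
    else keywordlLoopA cs fword []

def keywordl (text : String) : List String :=
  keywordlLoopA (PySem.Str.lower text).toList [] []

-- ===== PORT B =====
-- B's outer while over positions, ported structurally: at an alnum char the inner
-- 'while j < n and s[j].isalnum(): j += 1' computes the maximal alnum run (takeWhile),
-- s[i:j] is that run, and 'i = j' skips it (dropWhile); exact on every input.
def keywordlRunsB : List Char → List String
  | [] => []
  | c :: cs =>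
    if PySem.Chars.isalnum c then
      let run := c :: cs.takeWhile PySem.Chars.isalnum
      let rest := cs.dropWhile PySem.Chars.isalnum
      if 3 < run.length then String.mk run :: keywordlRunsB rest else keywordlRunsB rest
    else keywordlRunsB cs
termination_by cs => cs.length
decreasing_by
  · simpa using Nat.lt_succ_of_le (List.length_dropWhile_le _ _)
  · simpa using Nat.lt_succ_of_le (List.length_dropWhile_le _ _)
  · simp

def keywordl_alt (text : String) : List String :=
  keywordlRunsB (PySem.Str.lower text).toList

-- ===== PRECONDITION & SPEC =====
def Spec_keywordl (text : String) (out : List String) : Prop := out = keywordl_alt text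
instance (text : String) (out : List String) : Decidable (Spec_keywordl text out) := by unfold Spec_keywordl; infer_instance

-- ===== CLAIM (what is proved, stated in full; the proofs are below) =====
def Claim_equal_keywordl : Prop := ∀ (text : String), Dom_keywordl text → Spec_keywordl text (keywordl text)

-- ===== LEMMAS AND PROOFS =====

-- runsB's own one-step unfolding, phrased uniformly via takeWhile/dropWhile.
lemma runsB_unfold (cs : List Char) :
    (if 3 < (cs.takeWhile PySem.Chars.isalnum).length
       then [String.mk (cs.takeWhile PySem.Chars.isalnum)] else [])
      ++ keywordlRunsB (cs.dropWhile PySem.Chars.isalnum) = keywordlRunsB cs := by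
  cases cs with
  | nil => simp [keywordlRunsB]
  | cons c cs =>
    by_cases h : PySem.Chars.isalnum c
    · simp [keywordlRunsB, h]
      split <;> simp
    · simp [keywordlRunsB, h]

-- A's loop flushes the pending word at the end of the current run and then behaves like runsB.
lemma loopA_eq (n : Nat) : ∀ cs : List Char, cs.length ≤ n → ∀ fword cword,
    keywordlLoopA cs fword cword =
      (if 3 < (cword ++ cs.takeWhile PySem.Chars.isalnum).length
         then fword ++ [String.mk (cword ++ cs.takeWhile PySem.Chars.isalnum)] else fword)
        ++ keywordlRunsB (cs.dropWhile PySem.Chars.isalnum) := by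
  induction n with
  | zero =>
    intro cs hlen fword cword
    have : cs = [] := List.length_eq_zero_iff.mp (Nat.le_zero.mp hlen)
    subst this
    simp [keywordlLoopA, keywordlRunsB]
  | succ n ih =>
    intro cs hlen fword cword
    cases cs with
    | nil => simp [keywordlLoopA, keywordlRunsB]
    | cons c cs =>
      simp only [List.length_cons, Nat.succ_le_succ_iff] at hlen
      by_cases h : PySem.Chars.isalnum c
      · simp only [keywordlLoopA, h, if_true, List.takeWhile_cons, List.dropWhile_cons]
        rw [ih cs hlen fword (cword ++ [c])]
        simp [List.append_assoc]
      · have hF : ∀ F : List String, keywordlLoopA cs F [] = F ++ keywordlRunsB cs := by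
          intro F
          rw [ih cs hlen F []]
          rw [← runsB_unfold cs]
          simp only [List.nil_append]
          split <;> simp
        simp only [keywordlLoopA, List.takeWhile_cons, List.dropWhile_cons, h,
          Bool.false_eq_true, if_false]
        rw [show keywordlRunsB (c :: cs) = keywordlRunsB cs from by simp [keywordlRunsB, h]]
        by_cases h3 : 3 < cword.length
        · simp [h3, hF]
        · simp [h3, hF]

-- ===== VERDICT (by name: the statement is the Claim_ definition above) =====
theorem keywordl_spec : Claim_equal_keywordl := by
  intro text _
  unfold Spec_keywordl keywordl keywordl_alt
  set cs := (PySem.Str.lower text).toList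
  rw [loopA_eq cs.length cs le_rfl [] []]
  rw [← runsB_unfold cs]
  simp only [List.nil_append]
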